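-- pv_equiv track=rewrite | github.com/OpaleRambaud/GB_barcodes_project | Phylo_AH-master/program/modules/__modules__.py | get_sequences_from_windows
-- ===== SOURCE A (Python) =====
-- def sliding_window(sequence, window_size, step):
--     """
--     create a sliding window with a size and step defined at program startup
--     """
--
--     if step <= 0:
--         raise Exception("** ERROR ** : step must be a positive value")
--     if step > window_size:
--         raise Exception("** ERROR ** : step must not be larger than window_size")
--     if window_size > len(sequence):
--         raise Exception("** ERROR ** : window_size must not be larger than sequence length")
--
--     i = 0
--     while i + window_size < len(sequence):
--         yield sequence[i:i + window_size]
--         i += step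
--
-- def get_sequences_from_windows(sequences, window_size, step):
--     """
--     retrieve a dictionnary containing the index of the windows as a key and
--     a list of windows associated with this index as a value
--     """
--
--     seq_dict = {}
--     for seq in sequences:
--         for index, win in enumerate(sliding_window(seq, window_size, step)):
--             tmp = index + 1
--             if tmp not in seq_dict.keys():
--                 seq_dict[tmp] = []
--             seq_dict[tmp].append(win)
--
--     return seq_dict
-- ===== SOURCE B (Python) =====
-- def get_sequences_from_windows(sequences, window_size, step):
--     # Column-major rebuild: first compute each sequence's full window list,
--     # then gather bucket c+1 as the c-th window of every row that has one.
--     rows = []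
--     for seq in sequences:
--         if step <= 0:
--             raise Exception("** ERROR ** : step must be a positive value")
--         if step > window_size:
--             raise Exception("** ERROR ** : step must not be larger than window_size")
--         if window_size > len(seq):
--             raise Exception("** ERROR ** : window_size must not be larger than sequence length")
--         rows.append([seq[i:i + window_size] for i in range(0, len(seq) - window_size, step)])
--     width = max(map(len, rows), default=0)
--     return {c + 1: [row[c] for row in rows if c < len(row)] for c in range(width)}
-- ===== Notes on version B (the rewrite author's own statement) =====
-- stated objective: alternative
-- what changed: B first materialises each sequence's full window list (a range comprehension per sequence) and then builds the dict column-major, gathering bucket c+1 as the c-th window of every row, instead of A's per-window key-test-and-append into the dict while scanning.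
import Mathlib
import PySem

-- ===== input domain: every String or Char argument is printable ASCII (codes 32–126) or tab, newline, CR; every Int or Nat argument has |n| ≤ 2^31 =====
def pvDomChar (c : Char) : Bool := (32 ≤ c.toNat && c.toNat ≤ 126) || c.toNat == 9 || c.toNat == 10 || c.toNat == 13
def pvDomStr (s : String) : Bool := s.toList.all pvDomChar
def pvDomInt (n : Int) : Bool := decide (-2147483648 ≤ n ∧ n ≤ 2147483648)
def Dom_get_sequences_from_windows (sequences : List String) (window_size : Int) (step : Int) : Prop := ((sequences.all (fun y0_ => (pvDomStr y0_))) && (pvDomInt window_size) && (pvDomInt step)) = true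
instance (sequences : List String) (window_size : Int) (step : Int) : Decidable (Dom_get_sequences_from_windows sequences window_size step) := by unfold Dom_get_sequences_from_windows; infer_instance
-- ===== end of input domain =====

-- B regroups the sliding windows column-major (build each sequence's row of
-- windows, then gather column c as bucket c+1) instead of A's per-window dict
-- appends; equivalence of the RETURN value is proved on Pre_ (where A raises, B raises too).

-- ===== PORT A =====
-- seq[i:i+window_size]
def pvWin (cs : List Char) (ws i : Int) : String :=
  String.ofList (PySem.List.slice cs (some i) (some (i + ws)))

-- 'i = 0; while i + window_size < len(sequence): yield seq[i:i+window_size]; i += step'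
-- (the '0 < step ∧ 0 ≤ ws' conjuncts are totality guards only: the Python loop is
--  reached only after the raise-checks established 0 < step ≤ window_size)
def pvWinLoop (cs : List Char) (ws step i : Int) : List String :=
  if _h : 0 < step ∧ 0 ≤ ws ∧ i + ws < (cs.length : Int) then
    pvWin cs ws i :: pvWinLoop cs ws step (i + step)
  else []
termination_by ((cs.length : Int) - i).toNat
decreasing_by omega

-- sliding_window: the three raise-checks (none = the Exception), then the loop
def slidingWindowA (s : String) (ws step : Int) : Option (List String) :=
  if step ≤ 0 then none
  else if ws < step then none
  else if (s.toList.length : Int) < ws then none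
  else some (pvWinLoop s.toList ws step 0)

-- loop body: tmp = index+1; if tmp not in seq_dict: seq_dict[tmp] = []; seq_dict[tmp].append(win)
def pvAdd (d : PySem.Dict Int (List String)) (p : Int × String) : PySem.Dict Int (List String) :=
  let tmp := p.1 + 1
  let d1 := if d.contains tmp then d else d.insert tmp ([] : List String)
  d1.insert tmp (d1.getD tmp [] ++ [p.2])

def get_sequences_from_windows (sequences : List String) (window_size : Int) (step : Int) : List (Int × List String) :=
  (sequences.foldl (fun d seq =>
      match slidingWindowA seq window_size step with
      | none => d   -- Python raises here: excluded by Pre_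
      | some wins => (PySem.List.enumerate wins 0).foldl pvAdd d)
    PySem.Dict.empty).items

-- ===== PORT B =====
-- [seq[i:i+window_size] for i in range(0, len(seq) - window_size, step)]
def pvRowB (s : String) (ws step : Int) : List String :=
  (PySem.List.pyRange 0 ((s.toList.length : Int) - ws) step).map
    (fun i => String.ofList (PySem.List.slice s.toList (some i) (some (i + ws))))

def get_sequences_from_windows_alt (sequences : List String) (window_size : Int) (step : Int) : List (Int × List String) :=
  let rows := sequences.map (fun s =>
    if step ≤ 0 ∨ window_size < step ∨ (s.toList.length : Int) < window_size then []  -- Python raises here: excluded by Pre_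
    else pvRowB s window_size step)
  -- width = max(map(len, rows), default=0)
  let width := rows.foldl (fun m r => max m r.length) 0
  -- {c+1: [row[c] for row in rows if c < len(row)] for c in range(width)}  (keys c+1 are fresh and distinct, so the dict is this list)
  (List.range width).map (fun (c : Nat) => ((c : Int) + 1, rows.filterMap (fun r => r[c]?)))

-- ===== PRECONDITION & SPEC =====
-- Pre_ excludes exactly the inputs on which A raises: a non-empty sequence list with
-- step ≤ 0, step > window_size, or some sequence shorter than window_size.
def Pre_get_sequences_from_windows (sequences : List String) (window_size : Int) (step : Int) : Prop :=
  sequences = [] ∨ (0 < step ∧ step ≤ window_size ∧ ∀ s ∈ sequences, window_size ≤ (s.toList.length : Int))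
instance (sequences : List String) (window_size : Int) (step : Int) : Decidable (Pre_get_sequences_from_windows sequences window_size step) := by
  unfold Pre_get_sequences_from_windows; infer_instance

def pvWitness_get_sequences_from_windows : List String × Int × Int := (["ABCDE", "ABCD"], 2, 1)

def Spec_get_sequences_from_windows (sequences : List String) (window_size : Int) (step : Int) (out : List (Int × List String)) : Prop := out = get_sequences_from_windows_alt sequences window_size step
instance (sequences : List String) (window_size : Int) (step : Int) (out : List (Int × List String)) : Decidable (Spec_get_sequences_from_windows sequences window_size step out) := by unfold Spec_get_sequences_from_windows; infer_instance

-- ===== CLAIM (what is proved, stated in full; the proofs are below) =====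
def Claim_equal_get_sequences_from_windows : Prop := ∀ (sequences : List String) (window_size : Int) (step : Int), Dom_get_sequences_from_windows sequences window_size step → Pre_get_sequences_from_windows sequences window_size step → Spec_get_sequences_from_windows sequences window_size step (get_sequences_from_windows sequences window_size step)

-- ===== LEMMAS AND PROOFS =====

-- range(a, b, s) with 0 < s, a < b starts with a
lemma pyRange_pos_cons (a b s : Int) (hs : 0 < s) (h : a < b) :
    PySem.List.pyRange a b s = a :: PySem.List.pyRange (a + s) b s := by
  rw [PySem.List.pyRange_of_pos _ _ hs, PySem.List.pyRange_of_pos _ _ hs]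
  have hd : ((b - a + s - 1) / s).toNat = ((b - (a + s) + s - 1) / s).toNat + 1 := by
    have h1 : b - a + s - 1 = (b - (a + s) + s - 1) + 1 * s := by ring
    rw [h1, Int.add_mul_ediv_right _ _ (by omega)]
    have h2 : 0 ≤ (b - (a + s) + s - 1) / s := by
      apply Int.ediv_nonneg <;> omega
    omega
  rw [if_pos h, hd]
  by_cases h2 : a + s < b
  · rw [if_pos h2, List.range_succ_eq_map]
    simp only [List.map_cons, List.map_map, Nat.cast_zero, mul_zero, add_zero]
    refine List.cons_eq_cons.mpr ⟨rfl, List.map_congr_left (fun k _ => ?_)⟩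
    simp only [Function.comp_apply, Nat.cast_succ]
    ring
  · rw [if_neg h2]
    have h0 : ((b - (a + s) + s - 1) / s).toNat = 0 := by
      have : (b - (a + s) + s - 1) / s = 0 := Int.ediv_eq_zero_of_lt (by omega) (by omega)
      omega
    rw [h0]
    simp

lemma pyRange_pos_nil (a b s : Int) (hs : 0 < s) (h : b ≤ a) :
    PySem.List.pyRange a b s = [] := by
  rw [PySem.List.pyRange_of_pos _ _ hs, if_neg (by omega)]
  simp

-- the while-loop of sliding_window equals the range comprehension of B
lemma pvWinLoop_eq (cs : List Char) (ws step : Int) (hs : 0 < step) (hw : 0 ≤ ws) :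
    ∀ i, pvWinLoop cs ws step i
      = (PySem.List.pyRange i ((cs.length : Int) - ws) step).map (fun j => pvWin cs ws j) := by
  have main : ∀ (n : Nat) (i : Int), ((cs.length : Int) - i).toNat = n →
      pvWinLoop cs ws step i
        = (PySem.List.pyRange i ((cs.length : Int) - ws) step).map (fun j => pvWin cs ws j) := by
    intro n
    induction n using Nat.strong_induction_on with
    | _ n ih =>
      intro i hn
      rw [pvWinLoop]
      by_cases h : i + ws < (cs.length : Int)
      · rw [dif_pos ⟨hs, hw, h⟩, pyRange_pos_cons _ _ _ hs (by omega), List.map_cons]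
        refine congrArg _ ?_
        exact ih (((cs.length : Int) - (i + step)).toNat) (by omega) _ rfl
      · rw [dif_neg (fun hc => h hc.2.2), pyRange_pos_nil _ _ _ hs (by omega)]
        simp
  intro i; exact main _ i rfl

-- processing one enumerated row into a dict whose items are columns 1..w
lemma inner_fold (r : List String) :
    ∀ (s w : Nat) (v : Nat → List String) (d : PySem.Dict Int (List String)),
      s ≤ w →
      d.items = (List.range w).map (fun (c : Nat) => ((c : Int) + 1, v c)) →
      ((PySem.List.enumerate r (s : Int)).foldl pvAdd d).items
        = (List.range (max w (s + r.length))).map (fun (c : Nat) => ((c : Int) + 1,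
            (if c < w then v c else []) ++ (if s ≤ c ∧ c - s < r.length then [r.getD (c - s) ""] else []))) := by
  induction r with
  | nil =>
    intro s w v d hsw hd
    simp only [PySem.List.enumerate_nil, List.foldl_nil, List.length_nil]
    rw [hd, Nat.max_eq_left (by omega)]
    refine List.map_congr_left (fun c hc => ?_)
    rw [List.mem_range] at hc
    simp [hc]
  | cons x t ih =>
    intro s w v d hsw hd
    have hkeys : d.keys = (List.range w).map (fun (c : Nat) => (c : Int) + 1) := by
      simp only [PySem.Dict.keys, hd, List.map_map]; rfl
    have hnodup : d.keys.Nodup := by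
      rw [hkeys]
      exact List.Nodup.map (fun a b hab => by omega) List.nodup_range
    rw [PySem.List.enumerate_cons, List.foldl_cons]
    by_cases hlt : s < w
    · -- key s+1 already present: in-place append
      have hcont : d.contains ((s : Int) + 1) = true := by
        rw [PySem.Dict.contains_eq_decide_mem_keys, hkeys]
        simp only [decide_eq_true_eq, List.mem_map, List.mem_range]
        exact ⟨s, hlt, rfl⟩
      have hmem : (((s : Int) + 1), v s) ∈ d.items := by
        rw [hd]; exact List.mem_map.mpr ⟨s, List.mem_range.mpr hlt, rfl⟩
      have hget : d.getD ((s : Int) + 1) [] = v s := PySem.Dict.getD_of_mem_items d hmem hnodup []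
      have hstep : (pvAdd d ((s : Int), x)).items
          = (List.range w).map (fun (c : Nat) => ((c : Int) + 1,
              if c = s then v s ++ [x] else v c)) := by
        simp only [pvAdd, hcont, if_true, hget]
        rw [PySem.Dict.items_insert_of_contains _ _ hcont, hd, List.map_map]
        refine List.map_congr_left (fun c hc => ?_)
        by_cases hcs : c = s
        · subst hcs; simp
        · have : ¬ ((c : Int) + 1 = (s : Int) + 1) := by omega
          simp [Function.comp, hcs, this]
      rw [show ((s : Int) + 1) = (((s + 1 : Nat) : Int)) from by push_cast; ring]
      rw [ih (s + 1) w _ _ (by omega) hstep]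
      have hrange : max w (s + 1 + t.length) = max w (s + (x :: t).length) := by
        simp [List.length_cons]; omega
      rw [hrange]
      refine List.map_congr_left (fun c hc => ?_)
      refine congrArg _ ?_
      by_cases hcs : c = s
      · simp only [hcs]
        rw [if_true, if_pos hlt,
          if_neg (by omega : ¬ (s + 1 ≤ s ∧ s - (s + 1) < t.length)),
          if_pos (by simp only [List.length_cons]; omega : s ≤ s ∧ s - s < (x :: t).length)]
        simp [hlt]
      · simp only [if_neg hcs]
        refine congrArg _ ?_
        by_cases h2 : s + 1 ≤ c ∧ c - (s + 1) < t.length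
        · rw [if_pos h2, if_pos (by simp only [List.length_cons]; omega : s ≤ c ∧ c - s < (x :: t).length)]
          have hcs2 : c - s = (c - (s + 1)) + 1 := by omega
          rw [hcs2, List.getD_cons_succ]
        · rw [if_neg h2, if_neg (by simp only [List.length_cons]; omega : ¬ (s ≤ c ∧ c - s < (x :: t).length))]
    · -- key s+1 is new: s = w, append then overwrite
      have hsw' : s = w := by omega
      subst hsw'
      have hcont : d.contains ((s : Int) + 1) = false := by
        rw [PySem.Dict.contains_eq_decide_mem_keys, hkeys]
        simp only [decide_eq_false_iff_not, List.mem_map, List.mem_range]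
        rintro ⟨c, hc, hceq⟩
        omega
      have hstep : (pvAdd d ((s : Int), x)).items
          = (List.range (s + 1)).map (fun (c : Nat) => ((c : Int) + 1,
              if c = s then [x] else v c)) := by
        simp only [pvAdd, hcont, Bool.false_eq_true, if_false]
        rw [PySem.Dict.getD_insert_self, PySem.Dict.items_insert_of_contains _ _
          (PySem.Dict.contains_insert_self _ _ _),
          PySem.Dict.items_insert_of_not_contains _ _ hcont, hd]
        rw [List.map_append, List.map_map, List.range_succ, List.map_append]
        refine congrArg₂ _ ?_ ?_
        · refine List.map_congr_left (fun c hc => ?_)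
          rw [List.mem_range] at hc
          have : ¬ ((c : Int) + 1 = (s : Int) + 1) := by omega
          simp [Function.comp, this, Nat.ne_of_lt hc]
        · simp
      rw [show ((s : Int) + 1) = (((s + 1 : Nat) : Int)) from by push_cast; ring]
      rw [ih (s + 1) (s + 1) _ _ (le_refl _) hstep]
      have hrange : max (s + 1) (s + 1 + t.length) = max s (s + (x :: t).length) := by
        simp [List.length_cons]; omega
      rw [hrange]
      refine List.map_congr_left (fun c hc => ?_)
      refine congrArg _ ?_
      by_cases hcs : c = s
      · simp only [hcs]
        rw [if_pos (by omega : s < s + 1), if_true,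
          if_neg (by omega : ¬ (s + 1 ≤ s ∧ s - (s + 1) < t.length)),
          if_neg (by omega : ¬ s < s),
          if_pos (by simp only [List.length_cons]; omega : s ≤ s ∧ s - s < (x :: t).length)]
        simp
      · simp only [if_neg hcs]
        by_cases hlt2 : c < s
        · rw [if_pos (by omega : c < s + 1), if_pos hlt2,
            if_neg (by omega : ¬ (s + 1 ≤ c ∧ c - (s + 1) < t.length)),
            if_neg (by simp only [List.length_cons]; omega : ¬ (s ≤ c ∧ c - s < (x :: t).length))]
        · rw [if_neg (by omega : ¬ c < s + 1), if_neg hlt2]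
          refine congrArg _ ?_
          by_cases h2 : s + 1 ≤ c ∧ c - (s + 1) < t.length
          · rw [if_pos h2, if_pos (by simp only [List.length_cons]; omega : s ≤ c ∧ c - s < (x :: t).length)]
            have hcs2 : c - s = (c - (s + 1)) + 1 := by omega
            rw [hcs2, List.getD_cons_succ]
          · rw [if_neg h2, if_neg (by simp only [List.length_cons]; omega : ¬ (s ≤ c ∧ c - s < (x :: t).length))]

-- the running max is monotone in its start value
lemma foldl_max_init_le (l : List (List String)) :
    ∀ (init : Nat), init ≤ l.foldl (fun m r => max m r.length) init := by
  induction l with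
  | nil => simp
  | cons a l ih => intro init; exact le_trans (le_max_left _ _) (ih _)

-- every row length is bounded by the fold-max width
lemma le_width (rows : List (List String)) :
    ∀ (init : Nat) (r : List String), r ∈ rows →
      r.length ≤ rows.foldl (fun m r => max m r.length) init := by
  induction rows with
  | nil => simp
  | cons a l ih =>
    intro init r hr
    rw [List.mem_cons] at hr
    rcases hr with rfl | hr
    · exact le_trans (le_max_right _ _) (foldl_max_init_le l _)
    · exact ih _ _ hr

-- a column index at or past the width hits no row
lemma cols_nil (rows : List (List String)) (c : Nat)
    (hc : rows.foldl (fun m r => max m r.length) 0 ≤ c) :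
    rows.filterMap (fun r => r[c]?) = [] := by
  rw [List.filterMap_eq_nil_iff]
  intro r hr
  exact List.getElem?_eq_none (le_trans (le_width rows 0 r hr) hc)

-- the grouping fold of A equals the column-major table of B, over any row list
lemma transpose (rows : List (List String)) :
    (rows.foldl (fun d r => (PySem.List.enumerate r 0).foldl pvAdd d) PySem.Dict.empty).items
      = (List.range (rows.foldl (fun m r => max m r.length) 0)).map
          (fun (c : Nat) => ((c : Int) + 1, rows.filterMap (fun r => r[c]?))) := by
  induction rows using List.reverseRecOn with
  | nil => rfl
  | append_singleton rs r ih =>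
    rw [List.foldl_append, List.foldl_cons, List.foldl_nil,
      List.foldl_append, List.foldl_cons, List.foldl_nil]
    have h0 := inner_fold r 0 (rs.foldl (fun m r => max m r.length) 0)
      (fun c => rs.filterMap (fun r' => r'[c]?)) _ (Nat.zero_le _) ih
    simp only [Nat.cast_zero, Nat.zero_add] at h0
    rw [h0]
    refine List.map_congr_left (fun c hc => ?_)
    refine congrArg _ ?_
    rw [List.filterMap_append]
    refine congrArg₂ _ ?_ ?_
    · by_cases hcw : c < rs.foldl (fun m r => max m r.length) 0
      · rw [if_pos hcw]
      · rw [if_neg hcw, cols_nil rs c (by omega)]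
    · by_cases hcr : c < r.length
      · rw [if_pos ⟨Nat.zero_le _, by simpa using hcr⟩]
        simp [List.getElem?_eq_getElem hcr, List.getD_eq_getElem r "" hcr]
      · rw [if_neg (by simpa using hcr)]
        simp [List.getElem?_eq_none (by omega : r.length ≤ c)]

-- ===== VERDICT (by name: the statement is the Claim_ definition above) =====
theorem get_sequences_from_windows_spec : Claim_equal_get_sequences_from_windows := by
  intro seqs ws step hdom hpre
  unfold Spec_get_sequences_from_windows
  rcases hpre with rfl | ⟨hs, hsw, hlen⟩
  · rfl
  · have hB : ∀ s ∈ seqs,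
        (if step ≤ 0 ∨ ws < step ∨ (s.toList.length : Int) < ws then []
         else pvRowB s ws step) = pvRowB s ws step := by
      intro s hsm
      rw [if_neg]
      rintro (h | h | h)
      · omega
      · omega
      · have := hlen s hsm
        omega
    have hA : ∀ s ∈ seqs, slidingWindowA s ws step = some (pvRowB s ws step) := by
      intro s hsm
      unfold slidingWindowA pvRowB
      rw [if_neg (by omega), if_neg (by omega),
        if_neg (by have := hlen s hsm; omega)]
      refine congrArg _ ?_
      exact pvWinLoop_eq s.toList ws step hs (by omega) 0
    unfold get_sequences_from_windows get_sequences_from_windows_alt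
    simp only [List.map_congr_left hB]
    have hfold : seqs.foldl
        (fun d seq => match slidingWindowA seq ws step with
          | none => d
          | some wins => (PySem.List.enumerate wins 0).foldl pvAdd d) PySem.Dict.empty
      = (seqs.map (fun s => pvRowB s ws step)).foldl
          (fun d r => (PySem.List.enumerate r 0).foldl pvAdd d) PySem.Dict.empty := by
      rw [List.foldl_map]
      refine PySem.List.foldl_congr_mem _ _ _ _ (fun d s hsm => ?_)
      rw [hA s hsm]
    rw [hfold]
    exact transpose _
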